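-- pv_equiv track=rewrite | github.com/nukusumus/Pisnovac | pisnovac_v0.5.py | to_tex
-- ===== SOURCE A (Python) =====
-- def to_tex(text: str) -> str:
--     """
--     text je text pisne, vraci prevedeny text do TEX
--     """
--
--     new_text = ""
--     chord = ""
--     next_word = ""
--     section_text = ""
--     loading_chord = False
--     loading_next_word = False
--     loading_section = False
--
--     # uchovani predchozi hodnoty
--     letter_history = []
--
--     # nahrazeni znacek akordu latexem
--     for letter in text:
--         letter_history.append(letter)
--         # kvuli latexu se musi nove radky duplikovat
--         if letter == "\n":
--             letter = "\n\n"
--         # nacita se slovo, ktere se pak da do zavorky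
--         if loading_next_word:
--             if (letter == " " or letter == "," or letter == "[") and next_word != "" or letter[0] == "\n":
--                 if letter[0] == "\n" and next_word == "":
--                     next_word += " "
--                 new_text += "\\Ch{" + chord + "}{" + next_word + "}"
--                 chord = ""
--                 next_word = ""
--                 loading_next_word = False
--                 if letter != "[":
--                     new_text += letter
--                     continue
--             else:
--                 next_word += letter
--                 continue
--
--         # nacita se bezny text
--         # nesmi byt elif, protoze nekdy se na tuto podminku pokracuje z predchozi
--         if not loading_chord and not loading_section and not loading_next_word:
--             if letter == "[":
--                 loading_chord = True
--                 continue
--             elif letter == "{":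
--                 loading_section = True
--                 continue
--             else:
--                 # repetice + urceni orientace zavorky
--                 if letter == "|":
--                     if len(letter_history) >= 2 and letter_history[-2] == ":":
--                         letter = "]"
--                     else:
--                         letter = "["
--
--                 new_text += letter
--         #nacita se akord
--         elif loading_chord:
--             if letter == "]":
--                 loading_chord = False
--                 loading_next_word = True
--                 continue
--             else:
--                 chord += letter
--         # nacita se sekce (refren, sloka)
--         elif loading_section:
--             if letter == "}":
--                 loading_section = False
--                 # pokud neni zadan nazev sloky, nedava se dvojtecka
--                 if section_text == "":
--                     new_text += "\\subsection*{" + section_text + "}"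
--                 else:
--                     new_text += "\\subsection*{" + section_text + ":}"
--
--                 section_text = ""
--             else:
--                 section_text += letter
--
--     return new_text
-- ===== SOURCE B (Python) =====
-- def to_tex(text: str) -> str:
--     """Index-based scanner: slice chords/sections forward instead of a per-char flag state machine."""
--     n = len(text)
--     out = []
--     i = 0
--     while i < n:
--         c = text[i]
--         if c == "[":
--             j = text.find("]", i + 1)
--             if j == -1:
--                 break  # unterminated chord: nothing more is emitted
--             chord = "".join("\n\n" if ch == "\n" else ch for ch in text[i + 1:j])
--             # load the word following the chord
--             k = j + 1
--             word = ""
--             emitted = False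
--             while k < n:
--                 d = text[k]
--                 if d == "\n":
--                     out.append("\\Ch{" + chord + "}{" + (word or " ") + "}\n\n")
--                     k += 1
--                     emitted = True
--                     break
--                 if d in " ," and word != "":
--                     out.append("\\Ch{" + chord + "}{" + word + "}" + d)
--                     k += 1
--                     emitted = True
--                     break
--                 if d == "[" and word != "":
--                     out.append("\\Ch{" + chord + "}{" + word + "}")
--                     emitted = True
--                     break  # the '[' starts a new chord; reprocess it
--                 word += d
--                 k += 1
--             if not emitted:
--                 break  # text ended while loading the word: it is dropped
--             i = k
--         elif c == "{":
--             j = text.find("}", i + 1)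
--             if j == -1:
--                 break  # unterminated section: nothing more is emitted
--             section = "".join("\n\n" if ch == "\n" else ch for ch in text[i + 1:j])
--             if section == "":
--                 out.append("\\subsection*{}")
--             else:
--                 out.append("\\subsection*{" + section + ":}")
--             i = j + 1
--         elif c == "\n":
--             out.append("\n\n")
--             i += 1
--         elif c == "|":
--             out.append("]" if i >= 1 and text[i - 1] == ":" else "[")
--             i += 1
--         else:
--             out.append(c)
--             i += 1
--     return "".join(out)
-- ===== Notes on version B (the rewrite author's own statement) =====
-- stated objective: alternative
-- what changed: Replaced A's per-character state machine with three boolean mode flags by an index-based scanner that, on '[' or '{', slices forward to the matching ']' or '}' and then consumes the following word in a dedicated inner loop.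
import Mathlib
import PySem

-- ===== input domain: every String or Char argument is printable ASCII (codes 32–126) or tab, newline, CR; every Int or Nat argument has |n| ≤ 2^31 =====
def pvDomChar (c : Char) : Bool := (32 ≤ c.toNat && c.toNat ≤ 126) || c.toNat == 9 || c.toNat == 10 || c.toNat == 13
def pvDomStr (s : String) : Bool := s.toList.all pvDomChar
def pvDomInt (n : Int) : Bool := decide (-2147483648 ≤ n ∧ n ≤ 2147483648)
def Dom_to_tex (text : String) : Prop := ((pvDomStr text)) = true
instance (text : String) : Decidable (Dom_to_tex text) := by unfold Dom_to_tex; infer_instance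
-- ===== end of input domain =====

-- B replaces A's per-char boolean-flag state machine by an index-style scanner that slices
-- each chord/section forward to its closing bracket (objective: alternative decomposition).

-- ===== PORT A =====
-- A's mutable locals as a record; letter_history is only read at [-2], kept as `prev`.
structure StA where
  out   : String
  chord : String
  word  : String
  sect  : String
  lc    : Bool
  lw    : Bool
  ls    : Bool
  prev  : Option Char

-- one iteration of A's for-loop; `letter` duplicates newlines, so comparisons of the
-- Python `letter` against the one-char literals " " "," "[" "{" "]" "}" "|" and the
-- check letter[0]=="\n" are written as the equivalent comparisons of the source char.
def stepA (s : StA) (ch : Char) : StA :=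
  let prev := s.prev
  let s1 : StA := { s with prev := some ch }
  let letter : String := if ch = '\n' then "\n\n" else String.singleton ch
  if s1.lw then
    if ((ch = ' ' ∨ ch = ',' ∨ ch = '[') ∧ s1.word ≠ "") ∨ ch = '\n' then
      let w := if ch = '\n' ∧ s1.word = "" then " " else s1.word
      let s2 : StA := { s1 with
          out := s1.out ++ "\\Ch{" ++ s1.chord ++ "}{" ++ w ++ "}",
          chord := "", word := "", lw := false }
      if ch ≠ '[' then { s2 with out := s2.out ++ letter }
      else { s2 with lc := true }   -- falls through to the normal block with letter == "["
    else { s1 with word := s1.word ++ letter }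
  else if s1.lc = false ∧ s1.ls = false then
    if ch = '[' then { s1 with lc := true }
    else if ch = '{' then { s1 with ls := true }
    else
      let piece := if ch = '|' then (if prev = some ':' then "]" else "[") else letter
      { s1 with out := s1.out ++ piece }
  else if s1.lc then
    if ch = ']' then { s1 with lc := false, lw := true }
    else { s1 with chord := s1.chord ++ letter }
  else
    if ch = '}' then
      { s1 with
          out := s1.out ++ (if s1.sect = "" then "\\subsection*{" ++ s1.sect ++ "}"
                            else "\\subsection*{" ++ s1.sect ++ ":}"),
          sect := "", ls := false }
    else { s1 with sect := s1.sect ++ letter }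

def to_tex (text : String) : String :=
  (text.toList.foldl stepA ⟨"", "", "", "", false, false, false, none⟩).out

-- ===== PORT B =====
-- text.find(close, i+1) as a split at the first occurrence of `t`
def scanTo (t : Char) : List Char → Option (List Char × List Char)
  | [] => none
  | c :: cs =>
    if c = t then some ([], cs)
    else match scanTo t cs with
      | none => none
      | some (p, q) => some (c :: p, q)

-- ''.join('\n\n' if ch=='\n' else ch for ch in slice)
def expand (c : Char) : String := if c = '\n' then "\n\n" else String.singleton c
def expandAll : List Char → String
  | [] => ""
  | c :: l => expand c ++ expandAll l

theorem scanTo_length {t : Char} : ∀ {l p q : List Char},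
    scanTo t l = some (p, q) → q.length < l.length := by
  intro l
  induction l with
  | nil => intro p q h; simp [scanTo] at h
  | cons c cs ih =>
    intro p q h
    simp only [scanTo] at h
    split at h
    · simp only [Option.some.injEq, Prod.mk.injEq] at h
      obtain ⟨-, hq⟩ := h
      subst hq; simp
    · cases hc : scanTo t cs with
      | none => rw [hc] at h; simp at h
      | some pq =>
        obtain ⟨p', q'⟩ := pq
        rw [hc] at h
        simp only [Option.some.injEq, Prod.mk.injEq] at h
        obtain ⟨-, hq⟩ := h
        subst hq
        have := ih hc
        simp; omega

mutual
-- B's outer while-loop (prev = text[i-1])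
def bMain (prev : Option Char) (l : List Char) : String :=
  match l with
  | [] => ""
  | c :: rest =>
    if c = '[' then
      match _hs : scanTo ']' rest with
      | none => ""
      | some (pre, post) => bWord (expandAll pre) "" post
    else if c = '{' then
      match _hs : scanTo '}' rest with
      | none => ""
      | some (pre, post) =>
        (if expandAll pre = "" then "\\subsection*{}"
         else "\\subsection*{" ++ expandAll pre ++ ":}") ++ bMain (some '}') post
    else if c = '\n' then "\n\n" ++ bMain (some '\n') rest
    else if c = '|' then (if prev = some ':' then "]" else "[") ++ bMain (some '|') rest
    else String.singleton c ++ bMain (some c) rest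
termination_by l.length
decreasing_by
  all_goals simp
  all_goals have := scanTo_length _hs
  all_goals omega

-- B's inner word-loading loop; the terminating '[' starts the next chord directly
def bWord (chord word : String) (l : List Char) : String :=
  match l with
  | [] => ""
  | c :: rest =>
    if c = '\n' then
      "\\Ch{" ++ chord ++ "}{" ++ (if word = "" then " " else word) ++ "}" ++ "\n\n" ++
        bMain (some '\n') rest
    else if (c = ' ' ∨ c = ',') ∧ word ≠ "" then
      "\\Ch{" ++ chord ++ "}{" ++ word ++ "}" ++ String.singleton c ++ bMain (some c) rest
    else if c = '[' ∧ word ≠ "" then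
      "\\Ch{" ++ chord ++ "}{" ++ word ++ "}" ++
        (match _hs : scanTo ']' rest with
         | none => ""
         | some (pre, post) => bWord (expandAll pre) "" post)
    else bWord chord (word ++ String.singleton c) rest
termination_by l.length
decreasing_by
  all_goals simp
  all_goals have := scanTo_length _hs
  all_goals omega
end

def to_tex_alt (text : String) : String := bMain none text.toList

-- ===== PRECONDITION & SPEC =====
def Spec_to_tex (text : String) (out : String) : Prop := out = to_tex_alt text
instance (text : String) (out : String) : Decidable (Spec_to_tex text out) := by unfold Spec_to_tex; infer_instance

-- ===== CLAIM (what is proved, stated in full; the proofs are below) =====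
def Claim_equal_to_tex : Prop := ∀ (text : String), Dom_to_tex text → Spec_to_tex text (to_tex text)

-- ===== LEMMAS AND PROOFS =====

-- B's continuation seen from the middle of a chord (A's loading_chord state, `c` read so far)
def chordCont (c : String) (l : List Char) : String :=
  match scanTo ']' l with
  | none => ""
  | some (pre, post) => bWord (c ++ expandAll pre) "" post

-- B's continuation seen from the middle of a section (A's loading_section state)
def sectCont (sct : String) (l : List Char) : String :=
  match scanTo '}' l with
  | none => ""
  | some (pre, post) =>
    (if sct ++ expandAll pre = "" then "\\subsection*{}"
     else "\\subsection*{" ++ (sct ++ expandAll pre) ++ ":}") ++ bMain (some '}') post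

theorem chordCont_hit (s : String) (rest : List Char) :
    chordCont s (']' :: rest) = bWord s "" rest := by
  simp [chordCont, scanTo, expandAll]

theorem chordCont_miss {ch : Char} (h : ch ≠ ']') (s : String) (rest : List Char) :
    chordCont s (ch :: rest) = chordCont (s ++ expand ch) rest := by
  simp only [chordCont, scanTo, if_neg h]
  cases hc : scanTo ']' rest with
  | none => simp
  | some pq =>
    obtain ⟨p, q⟩ := pq
    simp [expandAll, String.append_assoc]

theorem sectCont_hit (s : String) (rest : List Char) :
    sectCont s ('}' :: rest) = (if s = "" then "\\subsection*{}"
      else "\\subsection*{" ++ s ++ ":}") ++ bMain (some '}') rest := by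
  simp [sectCont, scanTo, expandAll]

theorem sectCont_miss {ch : Char} (h : ch ≠ '}') (s : String) (rest : List Char) :
    sectCont s (ch :: rest) = sectCont (s ++ expand ch) rest := by
  simp only [sectCont, scanTo, if_neg h]
  cases hc : scanTo '}' rest with
  | none => simp
  | some pq =>
    obtain ⟨p, q⟩ := pq
    simp [expandAll, String.append_assoc]

theorem bMain_bracket (prev : Option Char) (rest : List Char) :
    bMain prev ('[' :: rest) = chordCont "" rest := by
  rw [bMain, chordCont]
  cases scanTo ']' rest with
  | none => simp
  | some pq => obtain ⟨p, q⟩ := pq; simp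

theorem bMain_brace (prev : Option Char) (rest : List Char) :
    bMain prev ('{' :: rest) = sectCont "" rest := by
  rw [bMain, sectCont]
  cases scanTo '}' rest with
  | none => simp
  | some pq => obtain ⟨p, q⟩ := pq; simp

-- the four A-states, one per conjunct, related to B's continuations
theorem invAll : ∀ l : List Char,
    (∀ out prev, (List.foldl stepA ⟨out, "", "", "", false, false, false, prev⟩ l).out
        = out ++ bMain prev l)
  ∧ (∀ out c prev, (List.foldl stepA ⟨out, c, "", "", true, false, false, prev⟩ l).out
        = out ++ chordCont c l)
  ∧ (∀ out c w prev, (List.foldl stepA ⟨out, c, w, "", false, true, false, prev⟩ l).out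
        = out ++ bWord c w l)
  ∧ (∀ out sct prev, (List.foldl stepA ⟨out, "", "", sct, false, false, true, prev⟩ l).out
        = out ++ sectCont sct l) := by
  intro l
  induction l with
  | nil =>
    refine ⟨?_, ?_, ?_, ?_⟩ <;> intros <;>
      simp [bMain, bWord, chordCont, sectCont, scanTo]
  | cons ch rest ih =>
    obtain ⟨ihM, ihC, ihW, ihS⟩ := ih
    refine ⟨?_, ?_, ?_, ?_⟩
    · -- normal state
      intro out prev
      simp only [List.foldl_cons]
      by_cases h1 : ch = '['
      · subst h1
        simp [stepA, ihC, bMain_bracket]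
      · by_cases h2 : ch = '{'
        · subst h2
          simp [stepA, ihS, bMain_brace]
        · by_cases h3 : ch = '\n'
          · subst h3
            simp [stepA, ihM, bMain, String.append_assoc]
          · by_cases h4 : ch = '|'
            · subst h4
              simp [stepA, ihM, bMain, String.append_assoc]
            · simp [stepA, ihM, bMain, h1, h2, h3, h4]
              simp only [← String.append_singleton, String.append_assoc]
    · -- chord state
      intro out c prev
      simp only [List.foldl_cons]
      by_cases h1 : ch = ']'
      · subst h1
        simp [stepA, ihW, chordCont_hit]
      · simp [stepA, h1, ihC, chordCont_miss h1, expand]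
    · -- word state
      intro out c w prev
      simp only [List.foldl_cons]
      by_cases hn : ch = '\n'
      · subst hn
        by_cases hw : w = ""
        · simp [stepA, hw, ihM, bWord, String.append_assoc]
        · simp [stepA, hw, ihM, bWord, String.append_assoc]
      · by_cases hw : w = ""
        · subst hw
          simp [stepA, hn, ihW, bWord]
        · by_cases hsp : ch = ' ' ∨ ch = ','
          · rcases hsp with h | h <;> subst h <;>
              · simp [stepA, hw, ihM, bWord, String.append_assoc]
                simp only [← String.append_singleton, String.append_assoc]
          · have hs1 : ch ≠ ' ' := fun h => hsp (Or.inl h)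
            have hs2 : ch ≠ ',' := fun h => hsp (Or.inr h)
            by_cases hbr : ch = '['
            · subst hbr
              simp only [stepA]
              rw [bWord]
              cases hc : scanTo ']' rest with
              | none => simp [hc, hw, ihC, chordCont, String.append_assoc]
              | some pq =>
                obtain ⟨p, q⟩ := pq
                simp [hc, hw, ihC, chordCont, String.append_assoc]
            · simp [stepA, hn, hs1, hs2, hbr, ihW, bWord]
    · -- section state
      intro out sct prev
      simp only [List.foldl_cons]
      by_cases h1 : ch = '}'
      · subst h1
        simp [stepA, ihM, sectCont_hit, String.append_assoc]
        split_ifs with h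
        · subst h; rfl
        · rfl
      · simp [stepA, h1, ihS, sectCont_miss h1, expand]

theorem to_tex_spec : Claim_equal_to_tex := by
  intro text _
  unfold Spec_to_tex to_tex to_tex_alt
  have h := (invAll text.toList).1 "" none
  simpa using h
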